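-- pv_equiv track=rewrite | github.com/hzwuhao8/ccc | 2018/s2.py | is_validate
-- ===== SOURCE A (Python) =====
-- def is_validate(data):
--     for r in data:
--         if is_sorted(r):
--             pass
--         else:
--             return False
--     for i in range(len(data)):
--         tmp = []
--         for j in range(len(data)):
--             tmp.append(data[j][i])
--         if is_sorted(tmp):
--             pass
--         else:
--             return False
--     return True
--
-- def is_sorted(r):
--     r1 = r.copy()
--     r2 = sorted(r1)
--     return r1 == r2
-- ===== SOURCE B (Python) =====
-- def is_validate(data):
--     n = len(data)
--     for row in data:
--         for a, b in zip(row, row[1:]):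
--             if a > b:
--                 return False
--     for prev, cur in zip(data, data[1:]):
--         for p, c in zip(prev[:n], cur[:n]):
--             if p > c:
--                 return False
--     return True
-- ===== Notes on version B (the rewrite author's own statement) =====
-- stated objective: alternative
-- what changed: Rows and columns are checked by single-pass adjacent comparisons (columns as elementwise comparison of consecutive rows) instead of copying and sorting each row and each explicitly built column and comparing; comparison count drops from O(n^2 log n) to O(n^2), though CPython's C-level sort makes A comparable in wall time.
import Mathlib
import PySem

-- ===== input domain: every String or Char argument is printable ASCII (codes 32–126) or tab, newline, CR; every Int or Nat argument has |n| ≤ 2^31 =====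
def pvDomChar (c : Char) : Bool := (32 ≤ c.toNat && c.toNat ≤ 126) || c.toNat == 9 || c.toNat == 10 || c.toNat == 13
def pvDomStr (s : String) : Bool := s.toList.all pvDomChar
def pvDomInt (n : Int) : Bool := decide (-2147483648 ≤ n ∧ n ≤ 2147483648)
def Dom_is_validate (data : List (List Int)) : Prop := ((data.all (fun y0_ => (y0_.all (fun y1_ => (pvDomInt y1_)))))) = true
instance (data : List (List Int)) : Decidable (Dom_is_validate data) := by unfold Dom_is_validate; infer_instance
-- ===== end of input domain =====

-- B replaces A's sort-and-compare row test and its explicit column construction by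
-- single-pass adjacent comparisons (within each row, and between consecutive rows).

-- ===== PORT A =====
-- is_sorted(r): r.copy() == sorted(r)
def isSortedA (r : List Int) : Bool := r == PySem.List.sorted r (fun x => x) false

-- data[j][i] is ported as pyGetD … [] / pyGetD … 0; Pre_ excludes exactly the inputs on
-- which Python's data[j][i] raises IndexError, so the defaults are never claimed about.
def is_validate (data : List (List Int)) : Bool :=
  (data.all (fun r => isSortedA r)) &&
  ((PySem.List.pyRange 0 (data.length : Int) 1).all (fun i =>
    isSortedA ((PySem.List.pyRange 0 (data.length : Int) 1).map
      (fun j => PySem.List.pyGetD (PySem.List.pyGetD data j []) i 0))))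

-- ===== PORT B =====
-- zip(row, row[1:]) → r.zip r.tail (row[1:] = tail, PySem.List.slice_from_one);
-- prev[:n] with n = len(data) ≥ 0 → List.take n (exact: PySem.List.slice_to_natCast).
def is_validate_alt (data : List (List Int)) : Bool :=
  let n := data.length
  (data.all (fun r => (r.zip r.tail).all (fun p => p.1 ≤ p.2))) &&
  ((data.zip data.tail).all (fun pc =>
    ((pc.1.take n).zip (pc.2.take n)).all (fun p => p.1 ≤ p.2)))

-- ===== PRECONDITION & SPEC =====
-- Pre_ excludes exactly the inputs on which Python A raises IndexError: all rows
-- non-decreasing, some row shorter than len(data), and every column index present in all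
-- rows giving a non-decreasing column — there A's transpose loop reads past a row's end.
def Pre_is_validate (data : List (List Int)) : Prop :=
  (∀ r ∈ data, List.IsChain (· ≤ ·) r) →
  (∃ r ∈ data, r.length < data.length) →
  ∃ i < data.length, (∀ r ∈ data, i < r.length) ∧
    ¬ List.IsChain (· ≤ ·) (data.map (fun r => r.getD i 0))
instance (data : List (List Int)) : Decidable (Pre_is_validate data) := by
  unfold Pre_is_validate; infer_instance
def pvWitness_is_validate : List (List Int) := [[1, 2], [1, 3]]

def Spec_is_validate (data : List (List Int)) (out : Bool) : Prop := out = is_validate_alt data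
instance (data : List (List Int)) (out : Bool) : Decidable (Spec_is_validate data out) := by unfold Spec_is_validate; infer_instance

-- ===== CLAIM (what is proved, stated in full; the proofs are below) =====
def Claim_equal_is_validate : Prop := ∀ (data : List (List Int)), Dom_is_validate data → Pre_is_validate data → Spec_is_validate data (is_validate data)

-- ===== LEMMAS AND PROOFS =====

-- the zip-with-tail adjacency check is IsChain
lemma zipTailAll_iff {α : Type} (p : α → α → Bool) :
    ∀ l : List α, ((l.zip l.tail).all (fun q => p q.1 q.2) = true ↔
      List.IsChain (fun a b => p a b = true) l)
  | [] => by simp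
  | [a] => by simp
  | a :: b :: t => by
    have ih := zipTailAll_iff p (b :: t)
    simp only [List.tail_cons, List.zip_cons_cons, List.all_cons, Bool.and_eq_true,
      List.isChain_cons_cons] at *
    tauto

-- A's sort-and-compare test accepts exactly the adjacent-wise non-decreasing lists
lemma isSortedA_iff (r : List Int) :
    isSortedA r = true ↔ List.IsChain (· ≤ ·) r := by
  rw [isSortedA, beq_iff_eq, List.isChain_iff_pairwise]
  constructor
  · intro h; rw [h]; exact PySem.List.sorted_pairwise r (fun x => x)
  · intro h; exact (PySem.List.sorted_eq_self_of_pairwise r (fun x => x) h).symm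

lemma isSortedA_eq_rowOk (r : List Int) :
    isSortedA r = ((r.zip r.tail).all (fun p => p.1 ≤ p.2)) := by
  have h2 := zipTailAll_iff (fun a b : Int => decide (a ≤ b)) r
  simp only [decide_eq_true_eq] at h2
  rw [Bool.eq_iff_iff, isSortedA_iff]
  exact Iff.symm h2

-- A's i-th column is data mapped through the i-th entry
lemma colA_eq (data : List (List Int)) (i : Int) :
    (PySem.List.pyRange 0 (data.length : Int) 1).map
      (fun j => PySem.List.pyGetD (PySem.List.pyGetD data j []) i 0) =
    data.map (fun r => PySem.List.pyGetD r i 0) := by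
  conv_rhs => rw [← PySem.List.map_pyGetD_pyRange_zero' data []]
  rw [List.map_map]
  rfl

-- elementwise reading of B's inner check on a pair of truncated rows
lemma zipTakeAll_iff (u v : List Int) (n : Nat) :
    (((u.take n).zip (v.take n)).all (fun p => p.1 ≤ p.2) = true ↔
      ∀ k : Nat, k < n → ∀ (h1 : k < u.length) (h2 : k < v.length), u[k] ≤ v[k]) := by
  rw [List.all_eq_true]
  constructor
  · intro h k hk h1 h2
    have hlen : k < ((u.take n).zip (v.take n)).length := by
      simp [List.length_zip, List.length_take]; omega
    have hm := List.getElem_mem hlen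
    have := h _ hm
    simpa [List.getElem_zip, List.getElem_take] using this
  · intro h q hq
    obtain ⟨k, hk, hq⟩ := List.mem_iff_getElem.mp hq
    subst hq
    have hkl : k < n ∧ k < u.length ∧ k < v.length := by
      simp [List.length_zip, List.length_take] at hk; omega
    simpa [List.getElem_zip, List.getElem_take] using h k hkl.1 hkl.2.1 hkl.2.2

-- B's column part, read as indexwise comparisons of consecutive rows
lemma colsB_iff (data : List (List Int)) (n : Nat) :
    ((data.zip data.tail).all (fun pc =>
      ((pc.1.take n).zip (pc.2.take n)).all (fun p => p.1 ≤ p.2)) = true ↔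
    ∀ j : Nat, (hj : j + 1 < data.length) →
      ∀ k : Nat, k < n → ∀ (h1 : k < data[j].length) (h2 : k < data[j+1].length),
        data[j][k] ≤ data[j+1][k]) := by
  rw [zipTailAll_iff (fun a b => ((a.take n).zip (b.take n)).all (fun p => p.1 ≤ p.2)) data,
    List.isChain_iff_getElem]
  constructor
  · intro h j hj k hk h1 h2
    exact (zipTakeAll_iff _ _ n).mp (h j hj) k hk h1 h2
  · intro h j hj
    exact (zipTakeAll_iff _ _ n).mpr (h j hj)

-- A's column part, read as: each column (with pyGetD's default) is non-decreasing
lemma colsA_iff (data : List (List Int)) :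
    ((PySem.List.pyRange 0 (data.length : Int) 1).all (fun i =>
      isSortedA ((PySem.List.pyRange 0 (data.length : Int) 1).map
        (fun j => PySem.List.pyGetD (PySem.List.pyGetD data j []) i 0))) = true ↔
    ∀ i : Nat, i < data.length →
      List.IsChain (· ≤ ·) (data.map (fun r => r.getD i 0))) := by
  rw [List.all_eq_true]
  constructor
  · intro h i hi
    have hmem : (i : Int) ∈ PySem.List.pyRange 0 (data.length : Int) 1 := by
      rw [PySem.List.mem_pyRange_one]; omega
    have := h _ hmem
    rw [colA_eq, isSortedA_iff] at this
    simpa using this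
  · intro h i hi
    rw [PySem.List.mem_pyRange_one] at hi
    rw [colA_eq, isSortedA_iff]
    have he : (fun r : List Int => PySem.List.pyGetD r i 0) = fun r => r.getD i.toNat 0 := by
      funext r
      rw [show i = ((i.toNat : Nat) : Int) by omega, PySem.List.pyGetD_natCast]
      rw [show ((i.toNat : Int)).toNat = i.toNat by omega]
    rw [he]
    exact h i.toNat (by omega)

lemma getD_eq_get (r : List Int) (i : Nat) (h : i < r.length) : r.getD i 0 = r[i] := by
  simp [List.getD_eq_getElem?_getD, List.getElem?_eq_getElem h]

theorem is_validate_main (data : List (List Int))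
    (hpre : Pre_is_validate data) :
    is_validate data = is_validate_alt data := by
  unfold Pre_is_validate at hpre
  unfold is_validate is_validate_alt
  dsimp only
  have hrows : (data.all (fun r => isSortedA r)) =
      data.all (fun r => (r.zip r.tail).all (fun p => p.1 ≤ p.2)) := by
    simp only [funext isSortedA_eq_rowOk]
  rw [hrows]
  cases hc : data.all (fun r => (r.zip r.tail).all (fun p => p.1 ≤ p.2)) with
  | false => simp
  | true =>
    simp only [Bool.true_and]
    -- all rows are non-decreasing
    have hsor : ∀ r ∈ data, List.IsChain (· ≤ ·) r := by
      intro r hr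
      have := (List.all_eq_true.mp hc) r hr
      have h2 := (zipTailAll_iff (fun a b : Int => decide (a ≤ b)) r)
      simp only [decide_eq_true_eq] at h2
      exact h2.mp this
    rw [Bool.eq_iff_iff, colsA_iff, colsB_iff]
    by_cases hshort : ∃ r ∈ data, r.length < data.length
    · obtain ⟨i, hi, hall, hbadcol⟩ := hpre hsor hshort
      apply iff_of_false
      · intro h; exact hbadcol (h i hi)
      · intro h
        apply hbadcol
        rw [List.isChain_map, List.isChain_iff_getElem]
        intro j hj
        have hj' : j + 1 < data.length := by simpa using hj
        have h1 : i < data[j].length := hall _ (List.getElem_mem (by omega))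
        have h2 : i < data[j+1].length := hall _ (List.getElem_mem (by omega))
        rw [getD_eq_get _ _ h1, getD_eq_get _ _ h2]
        exact h j hj' i hi h1 h2
    · push Not at hshort
      constructor
      · intro h j hj k hk h1 h2
        have := h k hk
        rw [List.isChain_map, List.isChain_iff_getElem] at this
        have hthis := this j (by simpa using hj)
        rwa [getD_eq_get _ _ h1, getD_eq_get _ _ h2] at hthis
      · intro h i hi
        rw [List.isChain_map, List.isChain_iff_getElem]
        intro j hj
        have hj' : j + 1 < data.length := by simpa using hj
        have h1 : i < data[j].length := lt_of_lt_of_le hi (hshort _ (List.getElem_mem (by omega)))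
        have h2 : i < data[j+1].length := lt_of_lt_of_le hi (hshort _ (List.getElem_mem (by omega)))
        rw [getD_eq_get _ _ h1, getD_eq_get _ _ h2]
        exact h j hj' i hi h1 h2

-- ===== VERDICT (by name: the statement is the Claim_ definition above) =====
theorem is_validate_spec : Claim_equal_is_validate := by
  intro data _ hpre
  exact is_validate_main data hpre
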